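-- pv_equiv track=rewrite | github.com/JingJiang-web/unitary-for-Hermitian-type | unitary_ABCD.py | find_p1_q1
-- ===== SOURCE A (Python) =====
-- def find_p1_q1(arr):
--     if len(arr) == 0:
--         return 0, 0
--     # 计算 p1
--     first_element = arr[0]
--     p1 = 0
--     for element in arr:
--         if element == first_element:
--             p1 += 1
--         else:
--             break
--     last_element = arr[-1]
--     q1 = 0
--     for element in reversed(arr):
--         if element == last_element:
--             q1 += 1
--         else:
--             break
--     return p1, q1
-- ===== SOURCE B (Python) =====
-- from itertools import groupby
--
-- def find_p1_q1(arr):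
--     runs = [sum(1 for _ in g) for _, g in groupby(arr)]
--     if not runs:
--         return 0, 0
--     return runs[0], runs[-1]
-- ===== Notes on version B (the rewrite author's own statement) =====
-- stated objective: idiomatic
-- what changed: Replaces the two directed early-stopping scans (forward and reversed, with manual counters and break) by a single groupby pass that materialises all run lengths and returns the first and last run.
import Mathlib
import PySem

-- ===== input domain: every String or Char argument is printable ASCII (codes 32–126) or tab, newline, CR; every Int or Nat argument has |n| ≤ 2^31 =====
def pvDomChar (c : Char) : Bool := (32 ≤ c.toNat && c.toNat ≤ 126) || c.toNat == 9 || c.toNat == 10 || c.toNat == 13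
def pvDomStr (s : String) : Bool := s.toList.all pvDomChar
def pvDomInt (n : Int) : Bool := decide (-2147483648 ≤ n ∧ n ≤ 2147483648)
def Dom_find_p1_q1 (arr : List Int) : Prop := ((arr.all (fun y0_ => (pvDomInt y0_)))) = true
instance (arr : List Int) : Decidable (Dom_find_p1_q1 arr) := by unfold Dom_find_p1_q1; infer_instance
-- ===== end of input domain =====

-- B replaces A's two directed early-stopping scans by one groupby-style pass that
-- collects all run lengths and returns the first and last run (objective: idiomatic).

-- ===== PORT A =====
-- the 'for element in …: if element == x: c += 1 else: break' loop of A
def pvLoopA (x : Int) (c : Int) : List Int → Int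
  | [] => c
  | e :: rest => if e == x then pvLoopA x (c + 1) rest else c

def find_p1_q1 (arr : List Int) : Int × Int :=
  match arr with
  | [] => (0, 0)
  | a :: _ =>
    let p1 := pvLoopA a 0 arr
    match arr.reverse with
    | [] => (p1, 0)   -- unreachable: arr is nonempty
    | b :: _ => (p1, pvLoopA b 0 arr.reverse)

-- ===== PORT B =====
-- run lengths of consecutive equal elements, as itertools.groupby yields them
def pvRuns : List Int → List Int
  | [] => []
  | a :: rest =>
    (1 + ((rest.takeWhile (· == a)).length : Int)) :: pvRuns (rest.dropWhile (· == a))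
  termination_by l => l.length
  decreasing_by
    simp only [List.length_cons]
    exact Nat.lt_succ_of_le (List.length_dropWhile_le _ _)

def find_p1_q1_alt (arr : List Int) : Int × Int :=
  match pvRuns arr with
  | [] => (0, 0)
  | h :: t => (h, (h :: t).getLastD h)

-- ===== PRECONDITION & SPEC =====
def Spec_find_p1_q1 (arr : List Int) (out : Int × Int) : Prop := out = find_p1_q1_alt arr
instance (arr : List Int) (out : Int × Int) : Decidable (Spec_find_p1_q1 arr out) := by unfold Spec_find_p1_q1; infer_instance

-- ===== CLAIM (what is proved, stated in full; the proofs are below) =====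
def Claim_equal_find_p1_q1 : Prop := ∀ (arr : List Int), Dom_find_p1_q1 arr → Spec_find_p1_q1 arr (find_p1_q1 arr)

-- ===== LEMMAS AND PROOFS =====

-- length of the leading run of a list (0 for [])
def pvPrefLen : List Int → Int
  | [] => 0
  | a :: rest => 1 + ((rest.takeWhile (· == a)).length : Int)

theorem pvLoopA_eq (l : List Int) (x : Int) : ∀ c : Int,
    pvLoopA x c l = c + ((l.takeWhile (· == x)).length : Int) := by
  induction l with
  | nil => intro c; simp [pvLoopA]
  | cons e rest ih =>
    intro c
    by_cases h : e = x
    · subst h; simp [pvLoopA, ih]; ring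
    · simp [pvLoopA, h]

theorem dropWhile_head_false (p : Int → Bool) (l : List Int) (x : Int) (l' : List Int)
    (h : l.dropWhile p = x :: l') : p x = false := by
  induction l with
  | nil => simp at h
  | cons a t ih =>
    by_cases ha : p a
    · exact ih (by simpa [List.dropWhile, ha] using h)
    · simp only [List.dropWhile, ha] at h
      simp only [List.cons.injEq] at h
      rw [← h.1]; exact Bool.of_not_eq_true ha

-- appending a block of a's after a list containing a non-a does not change its leading run
theorem pvPrefLen_append (r m : List Int) (a : Int)
    (hy : ∃ y ∈ r, y ≠ a) (hm : ∀ x ∈ m, x = a) :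
    pvPrefLen (r ++ m) = pvPrefLen r := by
  match r with
  | [] => obtain ⟨y, hy1, _⟩ := hy; simp at hy1
  | c :: r' =>
    simp only [List.cons_append, pvPrefLen]
    rw [List.takeWhile_append]
    split_ifs with hlen
    · have htw : r'.takeWhile (· == c) = r' :=
        (List.takeWhile_prefix _).eq_of_length hlen
      have hall : ∀ x ∈ r', (x == c) = true := List.takeWhile_eq_self_iff.mp htw
      -- every element of c :: r' equals c, so the witness y ≠ a forces c ≠ a
      have hca : c ≠ a := by
        obtain ⟨y, hy1, hy2⟩ := hy
        rcases List.mem_cons.mp hy1 with h1 | h1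
        · exact h1 ▸ hy2
        · have := hall y h1
          intro hc; exact hy2 (by simpa [hc] using this)
      have hmtw : m.takeWhile (· == c) = [] := by
        cases m with
        | nil => rfl
        | cons z zs =>
          have hz : z = a := hm z (List.mem_cons_self)
          have hac : (a == c) = false := beq_eq_false_iff_ne.mpr (Ne.symm hca)
          simp [List.takeWhile, hz, hac]
      rw [hmtw, htw, List.append_nil]
    · rfl

-- pvRuns of a nonempty list is nonempty
theorem pvRuns_ne_nil (a : Int) (rest : List Int) : pvRuns (a :: rest) ≠ [] := by
  rw [pvRuns]; simp

-- a nonempty constant list's leading run is the whole list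
theorem pvPrefLen_const (l : List Int) (a : Int) (hl : l ≠ []) (hall : ∀ x ∈ l, x = a) :
    pvPrefLen l = (l.length : Int) := by
  match l with
  | [] => exact absurd rfl hl
  | b :: lr =>
    have htw : lr.takeWhile (· == b) = lr :=
      List.takeWhile_eq_self_iff.mpr (fun x hx => by
        have hx' := hall x (List.mem_cons_of_mem _ hx)
        have hb := hall b List.mem_cons_self
        simp [hx', hb])
    simp [pvPrefLen, htw]
    omega

-- the last run length equals the leading run of the reversed list
theorem pvRuns_getLast? (arr : List Int) (h : arr ≠ []) :
    (pvRuns arr).getLast? = some (pvPrefLen arr.reverse) := by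
  induction arr using pvRuns.induct with
  | case1 => exact absurd rfl h
  | case2 a rest ih =>
    rw [pvRuns]
    rcases hdd : rest.dropWhile (· == a) with _ | ⟨h', d'⟩
    · -- the whole list is one constant run
      have htr : rest.takeWhile (· == a) = rest := by
        have := List.takeWhile_append_dropWhile (p := (· == a)) (l := rest)
        rw [hdd, List.append_nil] at this; exact this
      have hall : ∀ x ∈ (a :: rest).reverse, x = a := by
        intro x hx
        rcases List.mem_cons.mp (List.mem_reverse.mp hx) with h1 | h1
        · exact h1
        · have := List.takeWhile_eq_self_iff.mp htr x h1
          simpa using this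
      rw [htr]
      simp only [pvRuns, List.getLast?_singleton,
        pvPrefLen_const _ a (by simp) hall]
      simp
      omega
    · -- a later run exists: the last run is inside the dropped suffix
      rw [hdd] at ih
      obtain ⟨r0, rs, hr⟩ := List.exists_cons_of_ne_nil (pvRuns_ne_nil h' d')
      rw [hr, List.getLast?_cons_cons, ← hr, ih (by simp)]
      congr 1
      have hsplit : (a :: rest).reverse
          = (h' :: d').reverse ++ ((rest.takeWhile (· == a)).reverse ++ [a]) := by
        conv_lhs => rw [← List.takeWhile_append_dropWhile (p := (· == a)) (l := rest), hdd]
        simp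
      rw [hsplit]
      refine (pvPrefLen_append _ _ a ?_ ?_).symm
      · refine ⟨h', by simp, ?_⟩
        have := dropWhile_head_false (· == a) rest h' d' hdd
        simpa using this
      · intro x hx
        rcases List.mem_append.mp hx with h1 | h1
        · have := List.mem_takeWhile_imp (List.mem_reverse.mp h1)
          simpa using this
        · simpa using h1

theorem alt_eq (a : Int) (rest : List Int) :
    find_p1_q1_alt (a :: rest) = (pvPrefLen (a :: rest), pvPrefLen (a :: rest).reverse) := by
  have hlast := pvRuns_getLast? (a :: rest) (by simp)
  rw [pvRuns] at hlast
  rw [List.getLast?_cons] at hlast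
  rw [find_p1_q1_alt, pvRuns]
  simp only [List.getLastD_cons, Option.some.injEq] at hlast ⊢
  refine Prod.ext ?_ ?_
  · simp [pvPrefLen]
  · simpa using hlast

theorem find_p1_q1_eq (arr : List Int) :
    find_p1_q1 arr = find_p1_q1_alt arr := by
  match arr with
  | [] => simp [find_p1_q1, find_p1_q1_alt, pvRuns]
  | a :: rest =>
    obtain ⟨b, rb, hb⟩ := List.exists_cons_of_ne_nil (l := (a :: rest).reverse) (by simp)
    rw [alt_eq]
    simp only [find_p1_q1, hb, pvLoopA_eq]
    refine Prod.ext ?_ ?_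
    · simp [List.takeWhile, pvPrefLen]; omega
    · simp [List.takeWhile, pvPrefLen]; omega

-- ===== VERDICT (by name: the statement is the Claim_ definition above) =====
theorem find_p1_q1_spec : Claim_equal_find_p1_q1 := by
  intro arr _
  exact find_p1_q1_eq arr
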